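-- pv_equiv track=rewrite | github.com/the80hz/Amnezia-Web-Panel | telemt_manager.py | _update_line_in_section
-- ===== SOURCE A (Python) =====
-- def _update_line_in_section(config_text, section_name, client_id, value):
--     lines = config_text.split('\n')
--     section_start = -1
--     section_end = -1
--     for i, line in enumerate(lines):
--         if line.strip() == f"[{section_name}]":
--             section_start = i
--         elif section_start != -1 and line.strip().startswith('['):
--             section_end = i
--             break
--
--     if section_end == -1: section_end = len(lines)
--     if section_start == -1:
--         if value is not None:
--             lines.append(f"[{section_name}]")
--             lines.append(f'{client_id} = {value}')
--             lines.append("")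
--         return '\n'.join(lines)
--
--     found = False
--     for i in range(section_start + 1, section_end):
--         line = lines[i].strip().lstrip('#').strip()
--         if line.startswith(f"{client_id} ") or line.startswith(f"{client_id}="):
--             if value is None: lines.pop(i)
--             else: lines[i] = f'{client_id} = {value}'
--             found = True
--             break
--
--     if not found and value is not None:
--         lines.insert(section_start + 1, f'{client_id} = {value}')
--
--     return '\n'.join(lines)
-- ===== SOURCE B (Python) =====
-- def _update_line_in_section(config_text, section_name, client_id, value):
--     header = f"[{section_name}]"
--
--     def finalize(buf):
--         # resolve a buffered section body: replace/drop the first client line,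
--         # or prepend the new line if none is present
--         res = []
--         matched = False
--         for l in buf:
--             s = l.strip().lstrip('#').strip()
--             if not matched and (s.startswith(client_id + ' ') or s.startswith(client_id + '=')):
--                 matched = True
--                 if value is not None:
--                     res.append(f'{client_id} = {value}')
--             else:
--                 res.append(l)
--         if not matched and value is not None:
--             res.insert(0, f'{client_id} = {value}')
--         return res
--
--     out = []
--     buf = None      # section body since the most recent header line; None = not buffering
--     done = False    # the section has been resolved
--     for line in config_text.split('\n'):
--         if not done and line.strip() == header:
--             if buf is not None:
--                 out.extend(buf)     # a repeated header restarts the section body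
--             out.append(line)
--             buf = []
--         elif buf is not None and line.strip().startswith('['):
--             out.extend(finalize(buf))
--             out.append(line)
--             buf = None
--             done = True
--         elif buf is not None:
--             buf.append(line)
--         else:
--             out.append(line)
--     if buf is not None:
--         out.extend(finalize(buf))
--     elif not done and value is not None:
--         out.extend([header, f'{client_id} = {value}', ""])
--     return '\n'.join(out)
-- ===== Notes on version B (the rewrite author's own statement) =====
-- stated objective: alternative
-- what changed: A's two separate index-based scans over the whole list (enumerate with -1 sentinels to find section bounds, then an indexed range scan with in-place pop/assign/insert) are replaced by a single streaming pass: a state machine over the lines that commits output as it goes, buffers the section body after the most recent header, and resolves the buffer (replace/drop the first client line or prepend the new one) when the section ends at a stop line or EOF.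
import Mathlib
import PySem

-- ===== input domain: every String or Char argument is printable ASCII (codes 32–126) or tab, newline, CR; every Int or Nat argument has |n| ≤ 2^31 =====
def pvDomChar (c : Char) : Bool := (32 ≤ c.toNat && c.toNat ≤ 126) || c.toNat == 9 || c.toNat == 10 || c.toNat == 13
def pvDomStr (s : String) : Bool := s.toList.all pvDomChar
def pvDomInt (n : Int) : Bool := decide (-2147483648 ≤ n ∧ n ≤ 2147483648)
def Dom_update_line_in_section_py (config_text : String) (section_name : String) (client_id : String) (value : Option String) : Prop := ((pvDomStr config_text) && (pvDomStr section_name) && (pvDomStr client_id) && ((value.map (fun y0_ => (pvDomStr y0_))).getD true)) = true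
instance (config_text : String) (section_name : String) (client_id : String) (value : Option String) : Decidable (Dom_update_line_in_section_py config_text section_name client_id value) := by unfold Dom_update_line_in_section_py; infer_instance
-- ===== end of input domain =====

-- B replaces A's two index-based scans with -1 sentinels and in-place mutation (pop/set/insert)
-- by ONE streaming pass over the lines: a state machine (committed output, buffered section
-- body, done flag) that buffers the body after the most recent header and resolves it on the
-- section's end (stop line or EOF); same return value, similar cost.

-- helpers shared by both ports (both Pythons build the same f-strings / strip-based tests)
-- f"[{section_name}]"
def pvHdr (section_name : String) : List Char := '[' :: (section_name.toList ++ [']'])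
-- f'{client_id} = {value}'
def pvClientLine (client_id v : String) : List Char := client_id.toList ++ (' ' :: '=' :: ' ' :: v.toList)
-- line.strip().lstrip('#').strip().startswith(client_id+' ' / client_id+'=');
-- lstrip('#') is exactly dropWhile (· == '#') (PySem has no one-sided strip-with-chars)
def pvIsClient (cid l : List Char) : Bool :=
  let s := PySem.Chars.strip ((PySem.Chars.strip l).dropWhile (· == '#'))
  PySem.Chars.startswith s (cid ++ [' ']) || PySem.Chars.startswith s (cid ++ ['='])
-- l.strip() == header
def pvH (hdr l : List Char) : Bool := PySem.Chars.strip l == hdr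

-- ===== PORT A =====
-- A's first loop: enumerate with mutable section_start (s) / break giving section_end (-1 = no break)
def pvA_scan (hdr : List Char) : List (List Char) → Int → Int → Int × Int
  | [], _, s => (s, -1)
  | l :: ls, i, s =>
    if PySem.Chars.strip l == hdr then pvA_scan hdr ls (i+1) i
    else if s != -1 && PySem.Chars.startswith (PySem.Chars.strip l) ['['] then (s, i)
    else pvA_scan hdr ls (i+1) s

-- A's second loop: for i in range(section_start+1, section_end) with break on first client line
def pvA_find (cid : List Char) (lines : List (List Char)) : List Int → Option Int
  | [] => none
  | i :: is => if pvIsClient cid (PySem.List.pyGetD lines i []) then some i else pvA_find cid lines is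

def update_line_in_section_py (config_text : String) (section_name : String) (client_id : String) (value : Option String) : String :=
  let lines := PySem.Chars.splitOn config_text.toList ['\n']
  let hdr := pvHdr section_name
  let se := pvA_scan hdr lines 0 (-1)
  let e : Int := if se.2 == -1 then (lines.length : Int) else se.2
  if se.1 == -1 then
    match value with
    | some v => String.ofList (PySem.Chars.join ['\n'] ((lines ++ [hdr]) ++ [pvClientLine client_id v] ++ [[]]))
    | none => String.ofList (PySem.Chars.join ['\n'] lines)
  else
    match pvA_find client_id.toList lines (PySem.List.pyRange (se.1 + 1) e) with
    | some i =>
      match value with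
      | none => String.ofList (PySem.Chars.join ['\n'] (((PySem.List.pop? lines i).map Prod.snd).getD lines))
      | some v => String.ofList (PySem.Chars.join ['\n'] (PySem.List.pySetD lines i (pvClientLine client_id v)))
    | none =>
      match value with
      | some v => String.ofList (PySem.Chars.join ['\n'] (PySem.List.insert lines (se.1 + 1) (pvClientLine client_id v)))
      | none => String.ofList (PySem.Chars.join ['\n'] lines)

-- ===== PORT B =====
-- Source B's finalize: the 'for l in buf' loop with the matched flag and res accumulator
def pvFinLoop (cid : List Char) (nl? : Option (List Char)) :
    List (List Char) → Bool → List (List Char) → List (List Char) × Bool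
  | [], matched, res => (res, matched)
  | l :: t, matched, res =>
    if !matched && pvIsClient cid l then
      pvFinLoop cid nl? t true (res ++ nl?.toList)
    else pvFinLoop cid nl? t matched (res ++ [l])

-- Source B's finalize: run the loop, then res.insert(0, new_line) if nothing matched
def pvFinalize (cid : List Char) (nl? : Option (List Char)) (buf : List (List Char)) : List (List Char) :=
  match pvFinLoop cid nl? buf false [] with
  | (res, matched) =>
    if matched then res
    else match nl? with
      | some nl => nl :: res
      | none => res

-- one iteration of Source B's 'for line in ...' with state (out, buf, done)
def pvStep (hdr cid : List Char) (nl? : Option (List Char)) :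
    List (List Char) × Option (List (List Char)) × Bool → List Char →
    List (List Char) × Option (List (List Char)) × Bool
  | (out, buf, done), line =>
    if !done && pvH hdr line then
      (out ++ buf.getD [] ++ [line], some [], done)
    else
      match buf with
      | some b =>
        if PySem.Chars.startswith (PySem.Chars.strip line) ['['] then
          (out ++ pvFinalize cid nl? b ++ [line], none, true)
        else (out, some (b ++ [line]), done)
      | none => (out ++ [line], none, done)

def update_line_in_section_py_alt (config_text : String) (section_name : String) (client_id : String) (value : Option String) : String :=
  let hdr := pvHdr section_name
  let nl? := value.map (pvClientLine client_id)
  let st := (PySem.Chars.splitOn config_text.toList ['\n']).foldl (pvStep hdr client_id.toList nl?) ([], none, false)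
  let out := match st with
    | (o, some b, _) => o ++ pvFinalize client_id.toList nl? b
    | (o, none, done) =>
      if done then o
      else match nl? with
        | some nl => o ++ [hdr, nl, []]
        | none => o
  String.ofList (PySem.Chars.join ['\n'] out)

-- ===== PRECONDITION & SPEC =====
def Spec_update_line_in_section_py (config_text : String) (section_name : String) (client_id : String) (value : Option String) (out : String) : Prop := out = update_line_in_section_py_alt config_text section_name client_id value
instance (config_text : String) (section_name : String) (client_id : String) (value : Option String) (out : String) : Decidable (Spec_update_line_in_section_py config_text section_name client_id value out) := by unfold Spec_update_line_in_section_py; infer_instance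

-- ===== CLAIM (what is proved, stated in full; the proofs are below) =====
def Claim_equal_update_line_in_section_py : Prop := ∀ (config_text : String) (section_name : String) (client_id : String) (value : Option String), Dom_update_line_in_section_py config_text section_name client_id value → Spec_update_line_in_section_py config_text section_name client_id value (update_line_in_section_py config_text section_name client_id value)

-- ===== LEMMAS AND PROOFS =====
-- Both ports are proved equal to one staged intermediate model pvModel (proof-layer only):
-- first header f, section end e, last header s before e, first client line in (s, e).

-- the line that ends a section: starts with '[' but is not the header itself
def pvStop (hdr l : List Char) : Bool := PySem.Chars.startswith (PySem.Chars.strip l) ['['] && !pvH hdr l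

-- index of the last element satisfying p
def pvLastP {α : Type} (p : α → Bool) : List α → Option Nat
  | [] => none
  | x :: t =>
    match pvLastP p t with
    | some j => some (j+1)
    | none => if p x then some 0 else none

-- last header index before the first stop line
def pvLastH (hdr : List Char) : List (List Char) → Option Nat
  | [] => none
  | l :: t =>
    if pvStop hdr l then none
    else match pvLastH hdr t with
      | some j => some (j+1)
      | none => if pvH hdr l then some 0 else none

-- next((i for i in range(a, b) if p(lines[i])), None)
def pvB_findFwd (p : List Char → Bool) (lines : List (List Char)) (a b : Nat) : Option Nat :=
  if h : a < b then (if p (lines.getD a []) then some a else pvB_findFwd p lines (a+1) b) else none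
  termination_by b - a

-- next((i for i in range(b-1, a-1, -1) if p(lines[i])), None)
def pvB_findBwd (p : List Char → Bool) (lines : List (List Char)) (a b : Nat) : Option Nat :=
  if h : a < b then (if p (lines.getD (b-1) []) then some (b-1) else pvB_findBwd p lines a (b-1)) else none
  termination_by b

-- the staged intermediate model both ports are reduced to
def pvModel (config_text : String) (section_name : String) (client_id : String) (value : Option String) : String :=
  let hdr := pvHdr section_name
  let newLine? := value.map (pvClientLine client_id)
  let lines := PySem.Chars.splitOn config_text.toList ['\n']
  match lines.findIdx? (pvH hdr) with
  | none =>
    let out := match newLine? with | some nl => lines ++ [hdr, nl, []] | none => lines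
    String.ofList (PySem.Chars.join ['\n'] out)
  | some f =>
    let e := (pvB_findFwd (fun l => PySem.Chars.startswith (PySem.Chars.strip l) ['['] && !pvH hdr l) lines (f+1) lines.length).getD lines.length
    let s := (pvB_findBwd (pvH hdr) lines f e).getD f
    match pvB_findFwd (pvIsClient client_id.toList) lines (s+1) e with
    | some hit =>
      let mid := match newLine? with | some nl => [nl] | none => []
      String.ofList (PySem.Chars.join ['\n'] (lines.take hit ++ mid ++ lines.drop (hit+1)))
    | none =>
      match newLine? with
      | some nl => String.ofList (PySem.Chars.join ['\n'] (lines.take (s+1) ++ nl :: lines.drop (s+1)))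
      | none => String.ofList (PySem.Chars.join ['\n'] lines)

theorem pv_scan_none (hdr : List Char) (t : List (List Char)) (i : Int)
    (h : ∀ x ∈ t, pvH hdr x = false) : pvA_scan hdr t i (-1) = (-1, -1) := by
  induction t generalizing i with
  | nil => rfl
  | cons l t ih =>
    have hl : ¬ (PySem.Chars.strip l == hdr) = true := by
      simpa [pvH] using h l (by simp)
    simp only [pvA_scan, hl, if_false, bne_self_eq_false, Bool.false_and]
    exact ih (i+1) (fun x hx => h x (by simp [hx]))

theorem pv_scan_entry (hdr : List Char) (t : List (List Char)) (f : Nat) (i : Int)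
    (h : t.findIdx? (pvH hdr) = some f) :
    pvA_scan hdr t i (-1) = pvA_scan hdr (t.drop (f+1)) (i + f + 1) (i + f) := by
  induction t generalizing f i with
  | nil => simp at h
  | cons l t ih =>
    rw [List.findIdx?_cons] at h
    by_cases hl : pvH hdr l
    · simp [hl] at h
      subst h
      have hl' : (PySem.Chars.strip l == hdr) = true := hl
      simp [pvA_scan, hl']
    · simp [hl] at h
      obtain ⟨f', hf', rfl⟩ := h
      have hl' : ¬ (PySem.Chars.strip l == hdr) = true := hl
      simp only [pvA_scan, hl', if_false, bne_self_eq_false, Bool.false_and]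
      rw [ih f' (i+1) hf']
      have e1 : i + 1 + (f' : Int) + 1 = i + ((f' + 1 : Nat) : Int) + 1 := by push_cast; ring
      have e2 : i + 1 + (f' : Int) = i + ((f' + 1 : Nat) : Int) := by push_cast; ring
      rw [e1, e2]
      rfl

theorem pv_scan_pos (hdr : List Char) (t : List (List Char)) (i s : Int) (hi : 0 ≤ i) (hs : 0 ≤ s) :
    pvA_scan hdr t i s =
      ((pvLastH hdr t).elim s (fun j => i + j),
       (t.findIdx? (pvStop hdr)).elim (-1) (fun k => i + (k : Int))) := by
  induction t generalizing i s with
  | nil => simp [pvA_scan, pvLastH]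
  | cons l t ih =>
    by_cases hH : pvH hdr l
    · have hH' : (PySem.Chars.strip l == hdr) = true := hH
      have hstop : pvStop hdr l = false := by simp [pvStop, hH]
      simp only [pvA_scan, hH', if_true]
      rw [ih (i+1) i (by omega) (by omega)]
      rw [List.findIdx?_cons, hstop]
      simp only [pvLastH, hstop, Bool.false_eq_true, if_false, Prod.mk.injEq]
      refine ⟨?_, ?_⟩
      · cases hrec : pvLastH hdr t with
        | none => simp [hH]
        | some j => simp; push_cast; ring
      · cases hrec : t.findIdx? (pvStop hdr) with
        | none => simp
        | some k => simp; push_cast; ring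
    · have hH' : ¬ (PySem.Chars.strip l == hdr) = true := hH
      by_cases hBr : PySem.Chars.startswith (PySem.Chars.strip l) ['['] = true
      · have hstop : pvStop hdr l = true := by simp [pvStop, hBr, hH]
        have hne : (s != -1) = true := by simp [bne_iff_ne]; omega
        simp only [pvA_scan, hH', if_false, hne, hBr, Bool.and_self, if_true]
        rw [List.findIdx?_cons, hstop]
        simp [pvLastH, hstop]
      · have hstop : pvStop hdr l = false := by simp [pvStop, hBr]
        simp only [pvA_scan, hH', if_false, hBr, Bool.and_false, if_false]
        rw [ih (i+1) s (by omega) hs]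
        rw [List.findIdx?_cons, hstop]
        simp only [pvLastH, hstop, Bool.false_eq_true, if_false, Prod.mk.injEq]
        refine ⟨?_, ?_⟩
        · cases hrec : pvLastH hdr t with
          | none => simp [hH]
          | some j => simp; push_cast; ring
        · cases hrec : t.findIdx? (pvStop hdr) with
          | none => simp
          | some k => simp; push_cast; ring

theorem pv_lastH_eq (hdr : List Char) (t : List (List Char)) :
    pvLastH hdr t = pvLastP (pvH hdr) (t.takeWhile (fun l => !pvStop hdr l)) := by
  induction t with
  | nil => rfl
  | cons l t ih =>
    by_cases hstop : pvStop hdr l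
    · simp [pvLastH, hstop, List.takeWhile_cons, pvLastP]
    · simp only [pvLastH, hstop, Bool.false_eq_true, if_false, List.takeWhile_cons,
        Bool.not_false, if_true, pvLastP, ih]

theorem pv_takeWhile_not (p : List Char → Bool) (t : List (List Char)) :
    t.takeWhile (fun l => !p l) = t.take ((t.findIdx? p).getD t.length) := by
  induction t with
  | nil => rfl
  | cons l t ih =>
    rw [List.findIdx?_cons]
    by_cases hl : p l
    · simp [List.takeWhile_cons, hl]
    · simp only [List.takeWhile_cons, hl, Bool.false_eq_true, Bool.not_false, if_true, if_false]
      cases hrec : t.findIdx? p with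
      | none => simp [ih, hrec]
      | some k => simp [ih, hrec]

theorem pv_lastP_concat {α : Type} (p : α → Bool) (xs : List α) (x : α) :
    pvLastP p (xs ++ [x]) = if p x then some xs.length else pvLastP p xs := by
  induction xs with
  | nil => by_cases h : p x <;> simp [pvLastP, h]
  | cons y ys ih =>
    simp only [List.cons_append, pvLastP, ih]
    by_cases h : p x <;> simp [h]

theorem pv_lastP_lt {α : Type} (p : α → Bool) (xs : List α) (j : Nat)
    (h : pvLastP p xs = some j) : j < xs.length := by
  induction xs generalizing j with
  | nil => simp [pvLastP] at h
  | cons y ys ih =>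
    simp only [pvLastP] at h
    cases hrec : pvLastP p ys with
    | some j' =>
      rw [hrec] at h
      simp at h
      have := ih j' hrec
      simp; omega
    | none =>
      rw [hrec] at h
      by_cases hy : p y <;> simp [hy] at h
      simp [← h]

theorem pv_findFwd_eq (p : List Char → Bool) (lines : List (List Char)) (a : Nat)
    (ha : a ≤ lines.length) :
    pvB_findFwd p lines a lines.length = ((lines.drop a).findIdx? p).map (a + ·) := by
  fun_induction pvB_findFwd p lines a lines.length with
  | case1 a h hp =>
    have hd : lines.drop a = lines[a] :: lines.drop (a+1) := List.drop_eq_getElem_cons h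
    have hg : lines.getD a [] = lines[a] := List.getD_eq_getElem lines [] h
    rw [hg] at hp
    rw [hd, List.findIdx?_cons, if_pos hp]
    simp
  | case2 a h hp ih =>
    have hd : lines.drop a = lines[a] :: lines.drop (a+1) := List.drop_eq_getElem_cons h
    have hg : lines.getD a [] = lines[a] := List.getD_eq_getElem lines [] h
    rw [hg] at hp
    rw [hd, List.findIdx?_cons, if_neg hp]
    rw [ih (by omega)]
    cases (lines.drop (a+1)).findIdx? p with
    | none => simp
    | some k => simp; omega
  | case3 a h =>
    have he : a = lines.length := by omega
    subst he
    simp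

theorem pv_findFwd_some (p : List Char → Bool) (lines : List (List Char)) (a b j : Nat)
    (h : pvB_findFwd p lines a b = some j) : a ≤ j ∧ j < b := by
  fun_induction pvB_findFwd p lines a b with
  | case1 a h' hp => simp at h; omega
  | case2 a h' hp ih => have := ih h; omega
  | case3 a h' => simp at h

theorem pv_findBwd_eq (p : List Char → Bool) (lines : List (List Char)) (a b : Nat)
    (hb : b ≤ lines.length) (hab : a ≤ b) :
    pvB_findBwd p lines a b = (pvLastP p ((lines.drop a).take (b - a))).map (a + ·) := by
  fun_induction pvB_findBwd p lines a b with
  | case1 b h hp =>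
    have hlt : b - 1 < lines.length := by omega
    have hg : lines.getD (b-1) [] = lines[b-1] := List.getD_eq_getElem lines [] hlt
    rw [hg] at hp
    have hm : b - 1 - a < (lines.drop a).length := by simp; omega
    have hel : (lines.drop a)[b-1-a] = lines[b-1] := by
      rw [List.getElem_drop]; congr 1; omega
    have hseg : (lines.drop a).take (b - a) = (lines.drop a).take (b - 1 - a) ++ [lines[b-1]] := by
      have hba : b - a = (b - 1 - a) + 1 := by omega
      rw [hba, List.take_succ_eq_append_getElem hm, hel]
    rw [hseg, pv_lastP_concat, if_pos hp]
    have hlen : ((lines.drop a).take (b - 1 - a)).length = b - 1 - a := by simp; omega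
    rw [hlen]
    simp
    omega
  | case2 b h hp ih =>
    have hlt : b - 1 < lines.length := by omega
    have hg : lines.getD (b-1) [] = lines[b-1] := List.getD_eq_getElem lines [] hlt
    rw [hg] at hp
    have hm : b - 1 - a < (lines.drop a).length := by simp; omega
    have hel : (lines.drop a)[b-1-a] = lines[b-1] := by
      rw [List.getElem_drop]; congr 1; omega
    have hseg : (lines.drop a).take (b - a) = (lines.drop a).take (b - 1 - a) ++ [lines[b-1]] := by
      have hba : b - a = (b - 1 - a) + 1 := by omega
      rw [hba, List.take_succ_eq_append_getElem hm, hel]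
    rw [hseg, pv_lastP_concat, if_neg hp]
    exact ih (by omega) (by omega)
  | case3 b h =>
    have hba : b - a = 0 := by omega
    simp [hba, pvLastP]

theorem pv_find_range_aux (cid : List Char) (lines : List (List Char)) (b : Nat) :
    ∀ (n a : Nat), b - a = n →
    pvA_find cid lines (PySem.List.pyRange (a : Int) (b : Int)) =
      (pvB_findFwd (pvIsClient cid) lines a b).map (fun n => (n : Int)) := by
  intro n
  induction n with
  | zero =>
    intro a hn
    rw [PySem.List.pyRange_one_eq_nil (by omega)]
    unfold pvB_findFwd
    rw [dif_neg (by omega)]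
    rfl
  | succ n ih =>
    intro a hn
    have hab : a < b := by omega
    rw [PySem.List.pyRange_one_cons (by exact_mod_cast hab)]
    unfold pvB_findFwd
    rw [dif_pos hab]
    show (if pvIsClient cid (PySem.List.pyGetD lines (a:Int) []) then some (a:Int)
          else pvA_find cid lines (PySem.List.pyRange ((a:Int) + 1) (b:Int))) = _
    rw [PySem.List.pyGetD_natCast]
    by_cases hp : pvIsClient cid (lines.getD a [])
    · rw [if_pos hp, if_pos hp]
      rfl
    · rw [if_neg hp, if_neg hp]
      have hc : ((a:Int) + 1) = ((a+1 : Nat) : Int) := by push_cast; ring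
      rw [hc]
      exact ih (a+1) (by omega)

theorem pv_find_range_eq (cid : List Char) (lines : List (List Char)) (a b : Nat) :
    pvA_find cid lines (PySem.List.pyRange (a : Int) (b : Int)) =
      (pvB_findFwd (pvIsClient cid) lines a b).map (fun n => (n : Int)) :=
  pv_find_range_aux cid lines b (b - a) a rfl

theorem pv_s_eq (hdr : List Char) (lines : List (List Char)) (f eN : Nat)
    (hflt : f < lines.length) (hpf : pvH hdr lines[f] = true)
    (hfeN : f + 1 ≤ eN) (heNle : eN ≤ lines.length) :
    (pvB_findBwd (pvH hdr) lines f eN).getD f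
      = (pvLastP (pvH hdr) ((lines.drop (f+1)).take (eN - (f+1)))).elim f (fun j => f+1+j) := by
  rw [pv_findBwd_eq _ _ _ _ heNle (by omega)]
  have hdrop : lines.drop f = lines[f] :: lines.drop (f+1) := List.drop_eq_getElem_cons hflt
  have hsplit : eN - f = (eN - (f+1)) + 1 := by omega
  rw [hdrop, hsplit, List.take_succ_cons]
  simp only [pvLastP]
  cases hlp : pvLastP (pvH hdr) ((lines.drop (f+1)).take (eN - (f+1))) with
  | some j => simp; omega
  | none => simp [hpf]

theorem pv_branch (client_id : String) (value : Option String) (lines : List (List Char))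
    (sN eN : Nat) (h1 : sN < eN) (h2 : eN ≤ lines.length) :
    (match pvA_find client_id.toList lines (PySem.List.pyRange ((sN:Int)+1) ((eN:Int))) with
     | some i =>
       match value with
       | none => String.ofList (PySem.Chars.join ['\n'] (((PySem.List.pop? lines i).map Prod.snd).getD lines))
       | some v => String.ofList (PySem.Chars.join ['\n'] (PySem.List.pySetD lines i (pvClientLine client_id v)))
     | none =>
       match value with
       | some v => String.ofList (PySem.Chars.join ['\n'] (PySem.List.insert lines ((sN:Int)+1) (pvClientLine client_id v)))
       | none => String.ofList (PySem.Chars.join ['\n'] lines)) =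
    (match pvB_findFwd (pvIsClient client_id.toList) lines (sN+1) eN with
     | some hit =>
       let mid := match value.map (pvClientLine client_id) with | some nl => [nl] | none => []
       String.ofList (PySem.Chars.join ['\n'] (lines.take hit ++ mid ++ lines.drop (hit+1)))
     | none =>
       match value.map (pvClientLine client_id) with
       | some nl => String.ofList (PySem.Chars.join ['\n'] (lines.take (sN+1) ++ nl :: lines.drop (sN+1)))
       | none => String.ofList (PySem.Chars.join ['\n'] lines)) := by
  have hc : ((sN:Int)+1) = ((sN+1 : Nat) : Int) := by push_cast; ring
  rw [hc, pv_find_range_eq]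
  cases hhit : pvB_findFwd (pvIsClient client_id.toList) lines (sN+1) eN with
  | some hit =>
    obtain ⟨hge, hlt⟩ := pv_findFwd_some _ _ _ _ _ hhit
    have hlen : hit < lines.length := by omega
    cases value with
    | none =>
      show String.ofList (PySem.Chars.join ['\n'] (((PySem.List.pop? lines ((hit:Nat):Int)).map Prod.snd).getD lines)) = _
      rw [PySem.List.pop?_natCast lines hit hlen]
      simp only [Option.map_some, Option.getD_some]
      rw [List.eraseIdx_eq_take_drop_succ]
      simp
    | some v =>
      show String.ofList (PySem.Chars.join ['\n'] (PySem.List.pySetD lines ((hit:Nat):Int) (pvClientLine client_id v))) = _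
      rw [PySem.List.pySetD_natCast]
      rw [List.set_eq_take_cons_drop _ hlen]
      simp
  | none =>
    cases value with
    | none => simp
    | some v =>
      show String.ofList (PySem.Chars.join ['\n'] (PySem.List.insert lines ((sN+1:Nat):Int) (pvClientLine client_id v))) = _
      rw [PySem.List.insert_natCast lines (sN+1) _ (by omega)]
      simp

-- A equals the staged model
theorem pv_A_model (config_text section_name client_id : String) (value : Option String) :
    update_line_in_section_py config_text section_name client_id value =
      pvModel config_text section_name client_id value := by
  simp only [update_line_in_section_py, pvModel]
  set lines := PySem.Chars.splitOn config_text.toList ['\n'] with hlines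
  set hdr := pvHdr section_name with hhdr
  cases hfind : lines.findIdx? (pvH hdr) with
  | none =>
    have hscan : pvA_scan hdr lines 0 (-1) = (-1, -1) :=
      pv_scan_none hdr lines 0 (List.findIdx?_eq_none_iff.mp hfind)
    rw [hscan]
    cases value with
    | none => simp
    | some v => simp
  | some f =>
    obtain ⟨hflt, hpf, hprev⟩ := List.findIdx?_eq_some_iff_getElem.mp hfind
    have hscan := pv_scan_entry hdr lines f 0 hfind
    rw [pv_scan_pos hdr (lines.drop (f+1)) (0 + (f:Int) + 1) (0 + (f:Int)) (by omega) (by omega)] at hscan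
    have hrestlen : (lines.drop (f+1)).length = lines.length - (f+1) := by simp
    rw [pv_lastH_eq, pv_takeWhile_not] at hscan
    have hstopfun : (fun l => PySem.Chars.startswith (PySem.Chars.strip l) ['['] && !pvH hdr l) = pvStop hdr := rfl
    cases hk : (lines.drop (f+1)).findIdx? (pvStop hdr) with
    | none =>
      rw [hk] at hscan
      simp only [Option.getD_none, Option.elim_none, zero_add] at hscan
      rw [hrestlen] at hscan
      rw [hscan, hstopfun]
      have hBe : (pvB_findFwd (pvStop hdr) lines (f+1) lines.length).getD lines.length = lines.length := by
        rw [pv_findFwd_eq (pvStop hdr) lines (f+1) (by omega), hk]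
        rfl
      simp only [hBe]
      rw [pv_s_eq hdr lines f lines.length hflt hpf (by omega) (le_refl _)]
      cases hlp : pvLastP (pvH hdr) ((lines.drop (f+1)).take (lines.length - (f+1))) with
      | none =>
        simp only [Option.elim_none]
        have hb1 : (((f:Nat):Int) == -1) = false := by rw [beq_eq_false_iff_ne]; omega
        simp only [hb1, Bool.false_eq_true, if_false, beq_self_eq_true, if_true]
        exact pv_branch client_id value lines f lines.length (by omega) (le_refl _)
      | some j =>
        have hjlt : j < lines.length - (f+1) := by
          have h1 := pv_lastP_lt _ _ _ hlp
          have h2 : ((lines.drop (f+1)).take (lines.length - (f+1))).length ≤ lines.length - (f+1) :=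
            List.length_take_le _ _
          omega
        simp only [Option.elim_some]
        have hcast : (f:Int) + 1 + (j:Int) = ((f+1+j : Nat) : Int) := by push_cast; ring
        have hb1 : (((f+1+j:Nat):Int) == -1) = false := by rw [beq_eq_false_iff_ne]; omega
        simp only [hcast, hb1, Bool.false_eq_true, if_false, beq_self_eq_true, if_true]
        exact pv_branch client_id value lines (f+1+j) lines.length (by omega) (le_refl _)
    | some k =>
      obtain ⟨hklt, _, _⟩ := List.findIdx?_eq_some_iff_getElem.mp hk
      rw [hk] at hscan
      simp only [Option.getD_some, Option.elim_some, zero_add] at hscan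
      have hsegk : (lines.drop (f+1)).take k = (lines.drop (f+1)).take (f+1+k-(f+1)) := by
        congr 1
        omega
      rw [hsegk] at hscan
      have heNle : f+1+k ≤ lines.length := by omega
      rw [hscan, hstopfun]
      have hBe : (pvB_findFwd (pvStop hdr) lines (f+1) lines.length).getD lines.length = f+1+k := by
        rw [pv_findFwd_eq (pvStop hdr) lines (f+1) (by omega), hk]
        rfl
      simp only [hBe]
      rw [pv_s_eq hdr lines f (f+1+k) hflt hpf (by omega) heNle]
      have hecast : (f:Int) + 1 + (k:Int) = ((f+1+k : Nat) : Int) := by push_cast; ring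
      have hbe : (((f:Int) + 1 + (k:Int)) == -1) = false := by rw [beq_eq_false_iff_ne]; omega
      cases hlp : pvLastP (pvH hdr) ((lines.drop (f+1)).take (f+1+k-(f+1))) with
      | none =>
        simp only [Option.elim_none]
        have hb1 : (((f:Nat):Int) == -1) = false := by rw [beq_eq_false_iff_ne]; omega
        simp only [hb1, Bool.false_eq_true, if_false, hecast]
        exact pv_branch client_id value lines f (f+1+k) (by omega) heNle
      | some j =>
        have hjlt : j < f+1+k-(f+1) := by
          have h1 := pv_lastP_lt _ _ _ hlp
          have h2 : ((lines.drop (f+1)).take (f+1+k-(f+1))).length ≤ f+1+k-(f+1) :=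
            List.length_take_le _ _
          omega
        simp only [Option.elim_some]
        have hcast : (f:Int) + 1 + (j:Int) = ((f+1+j : Nat) : Int) := by push_cast; ring
        have hb1 : (((f+1+j:Nat):Int) == -1) = false := by rw [beq_eq_false_iff_ne]; omega
        simp only [hcast, hb1, Bool.false_eq_true, if_false, hecast]
        exact pv_branch client_id value lines (f+1+j) (f+1+k) (by omega) heNle

-- ========== B-side lemmas: characterizing the streaming fold ==========

theorem pv_finLoop_matched (cid : List Char) (nl? : Option (List Char))
    (t : List (List Char)) (res : List (List Char)) :
    pvFinLoop cid nl? t true res = (res ++ t, true) := by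
  induction t generalizing res with
  | nil => simp [pvFinLoop]
  | cons l t ih => simp [pvFinLoop, ih]

theorem pv_finLoop_false (cid : List Char) (nl? : Option (List Char))
    (t : List (List Char)) (res : List (List Char)) :
    pvFinLoop cid nl? t false res =
      match t.findIdx? (pvIsClient cid) with
      | some h => (res ++ t.take h ++ nl?.toList ++ t.drop (h+1), true)
      | none => (res ++ t, false) := by
  induction t generalizing res with
  | nil => simp [pvFinLoop]
  | cons l t ih =>
    rw [List.findIdx?_cons]
    by_cases hl : pvIsClient cid l
    · simp only [pvFinLoop, Bool.not_false, Bool.true_and, hl, if_true]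
      rw [pv_finLoop_matched]
      simp
    · simp only [pvFinLoop, Bool.not_false, Bool.true_and, hl, Bool.false_eq_true, if_false]
      rw [ih]
      cases t.findIdx? (pvIsClient cid) with
      | some h => simp
      | none => simp

theorem pv_finalize_eq (cid : List Char) (nl? : Option (List Char)) (buf : List (List Char)) :
    pvFinalize cid nl? buf =
      match buf.findIdx? (pvIsClient cid) with
      | some h => buf.take h ++ nl?.toList ++ buf.drop (h+1)
      | none => match nl? with | some nl => nl :: buf | none => buf := by
  unfold pvFinalize
  rw [pv_finLoop_false]
  cases buf.findIdx? (pvIsClient cid) with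
  | some h => simp
  | none => cases nl? <;> simp

-- pass-through before any header
theorem pv_fold_pre (hdr cid : List Char) (nl? : Option (List Char))
    (t : List (List Char)) (out : List (List Char))
    (h : ∀ l ∈ t, pvH hdr l = false) :
    t.foldl (pvStep hdr cid nl?) (out, none, false) = (out ++ t, none, false) := by
  induction t generalizing out with
  | nil => simp
  | cons l t ih =>
    have hl : pvH hdr l = false := h l (by simp)
    simp only [List.foldl_cons, pvStep, hl, Bool.not_false, Bool.true_and, Bool.false_eq_true,
      if_false]
    rw [ih (out ++ [l]) (fun x hx => h x (by simp [hx]))]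
    simp

-- pass-through after the section is resolved
theorem pv_fold_done (hdr cid : List Char) (nl? : Option (List Char))
    (t : List (List Char)) (out : List (List Char)) :
    t.foldl (pvStep hdr cid nl?) (out, none, true) = (out ++ t, none, true) := by
  induction t generalizing out with
  | nil => simp
  | cons l t ih =>
    simp only [List.foldl_cons, pvStep, Bool.not_true, Bool.false_and, Bool.false_eq_true, if_false]
    rw [ih (out ++ [l])]
    simp

-- resolve the final fold state into the output list (the tail of the alt port)
def pvPost (cid hdr : List Char) (nl? : Option (List Char))
    (st : List (List Char) × Option (List (List Char)) × Bool) : List (List Char) :=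
  match st with
  | (o, some b, _) => o ++ pvFinalize cid nl? b
  | (o, none, done) =>
    if done then o
    else match nl? with
      | some nl => o ++ [hdr, nl, []]
      | none => o

-- the heart: closed form of the buffering phase, by first stop K and last header j in the segment
def pvSecRes (hdr cid : List Char) (nl? : Option (List Char))
    (rest out b : List (List Char)) : List (List Char) :=
  match pvLastP (pvH hdr) (rest.take ((rest.findIdx? (pvStop hdr)).getD rest.length)) with
  | none => out ++ pvFinalize cid nl? (b ++ rest.take ((rest.findIdx? (pvStop hdr)).getD rest.length)) ++ rest.drop ((rest.findIdx? (pvStop hdr)).getD rest.length)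
  | some j => out ++ b ++ (rest.take ((rest.findIdx? (pvStop hdr)).getD rest.length)).take (j+1) ++ pvFinalize cid nl? ((rest.take ((rest.findIdx? (pvStop hdr)).getD rest.length)).drop (j+1)) ++ rest.drop ((rest.findIdx? (pvStop hdr)).getD rest.length)

theorem pvSecRes_header (hdr cid : List Char) (nl? : Option (List Char))
    (l : List Char) (t out b : List (List Char)) (hH : pvH hdr l = true) :
    pvSecRes hdr cid nl? (l :: t) out b = pvSecRes hdr cid nl? t (out ++ b ++ [l]) [] := by
  have hstop : pvStop hdr l = false := by simp [pvStop, hH]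
  cases hk : t.findIdx? (pvStop hdr) with
  | none =>
    simp only [pvSecRes, List.findIdx?_cons, hstop, Bool.false_eq_true, if_false, hk,
      Option.map_none, Option.getD_none, List.length_cons, List.take_succ_cons, List.take_length,
      List.drop_succ_cons, List.drop_length, pvLastP]
    cases hlp : pvLastP (pvH hdr) t with
    | none => simp [hH, List.append_assoc]
    | some j => simp [List.append_assoc]
  | some k =>
    simp only [pvSecRes, List.findIdx?_cons, hstop, Bool.false_eq_true, if_false, hk,
      Option.map_some, Option.getD_some, List.take_succ_cons, List.drop_succ_cons, pvLastP]
    cases hlp : pvLastP (pvH hdr) (t.take k) with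
    | none => simp [hH, List.append_assoc]
    | some j => simp [List.append_assoc]

theorem pvSecRes_stop (hdr cid : List Char) (nl? : Option (List Char))
    (l : List Char) (t out b : List (List Char)) (hstop : pvStop hdr l = true) :
    pvSecRes hdr cid nl? (l :: t) out b = out ++ pvFinalize cid nl? b ++ l :: t := by
  simp only [pvSecRes, List.findIdx?_cons, hstop, if_true, Option.getD_some, List.take_zero,
    List.drop_zero]
  rw [show pvLastP (pvH hdr) ([] : List (List Char)) = none from rfl]
  simp [List.append_assoc]

theorem pvSecRes_other (hdr cid : List Char) (nl? : Option (List Char))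
    (l : List Char) (t out b : List (List Char))
    (hH : pvH hdr l = false) (hstop : pvStop hdr l = false) :
    pvSecRes hdr cid nl? (l :: t) out b = pvSecRes hdr cid nl? t out (b ++ [l]) := by
  cases hk : t.findIdx? (pvStop hdr) with
  | none =>
    simp only [pvSecRes, List.findIdx?_cons, hstop, Bool.false_eq_true, if_false, hk,
      Option.map_none, Option.getD_none, List.length_cons, List.take_succ_cons, List.take_length,
      List.drop_succ_cons, List.drop_length, pvLastP]
    cases hlp : pvLastP (pvH hdr) t with
    | none => simp [hH, List.append_assoc]
    | some j => simp [List.append_assoc]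
  | some k =>
    simp only [pvSecRes, List.findIdx?_cons, hstop, Bool.false_eq_true, if_false, hk,
      Option.map_some, Option.getD_some, List.take_succ_cons, List.drop_succ_cons, pvLastP]
    cases hlp : pvLastP (pvH hdr) (t.take k) with
    | none => simp [hH, List.append_assoc]
    | some j => simp [List.append_assoc]

theorem pv_fold_sec (hdr cid : List Char) (nl? : Option (List Char))
    (rest : List (List Char)) :
    ∀ out b,
    pvPost cid hdr nl? (rest.foldl (pvStep hdr cid nl?) (out, some b, false)) =
      pvSecRes hdr cid nl? rest out b := by
  induction rest with
  | nil =>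
    intro out b
    simp [pvPost, pvSecRes, pvLastP]
  | cons l t ih =>
    intro out b
    by_cases hH : pvH hdr l
    · have hstop : pvStop hdr l = false := by simp [pvStop, hH]
      simp only [List.foldl_cons, pvStep, hH, Bool.not_false, Bool.true_and, if_true,
        Option.getD_some]
      rw [ih (out ++ b ++ [l]) [], pvSecRes_header hdr cid nl? l t out b hH]
    · by_cases hBr : PySem.Chars.startswith (PySem.Chars.strip l) ['['] = true
      · have hstop : pvStop hdr l = true := by simp [pvStop, hBr, hH]
        simp only [List.foldl_cons, pvStep, hH, Bool.not_false, Bool.true_and, Bool.false_eq_true,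
          if_false, hBr, if_true]
        rw [pv_fold_done]
        rw [pvSecRes_stop hdr cid nl? l t out b hstop]
        simp [pvPost, List.append_assoc]
      · have hstop : pvStop hdr l = false := by simp [pvStop, hBr]
        simp only [List.foldl_cons, pvStep, hH, Bool.not_false, Bool.true_and, Bool.false_eq_true,
          if_false, hBr]
        rw [ih out (b ++ [l]), pvSecRes_other hdr cid nl? l t out b (by simp [hH]) hstop]

-- bounded forward search = findIdx? on the segment
theorem pv_findFwd_seg (p : List Char → Bool) (lines : List (List Char)) (a b : Nat)
    (hb : b ≤ lines.length) :
    pvB_findFwd p lines a b = (((lines.drop a).take (b - a)).findIdx? p).map (a + ·) := by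
  fun_induction pvB_findFwd p lines a b with
  | case1 a h hp =>
    have hlt : a < lines.length := by omega
    have hg : lines.getD a [] = lines[a] := List.getD_eq_getElem lines [] hlt
    rw [hg] at hp
    have hd : lines.drop a = lines[a] :: lines.drop (a+1) := List.drop_eq_getElem_cons hlt
    have hba : b - a = (b - (a+1)) + 1 := by omega
    rw [hd, hba, List.take_succ_cons, List.findIdx?_cons, if_pos hp]
    simp
  | case2 a h hp ih =>
    have hlt : a < lines.length := by omega
    have hg : lines.getD a [] = lines[a] := List.getD_eq_getElem lines [] hlt
    rw [hg] at hp
    have hd : lines.drop a = lines[a] :: lines.drop (a+1) := List.drop_eq_getElem_cons hlt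
    have hba : b - a = (b - (a+1)) + 1 := by omega
    rw [hd, hba, List.take_succ_cons, List.findIdx?_cons, if_neg hp, ih]
    cases ((lines.drop (a+1)).take (b - (a+1))).findIdx? p with
    | none => simp
    | some k => simp; omega
  | case3 a h =>
    have hba : b - a = 0 := by omega
    simp [hba]

-- the resolved section segment equals the model's branch (list level)
theorem pv_seg_branch (cid : List Char) (nl? : Option (List Char))
    (lines : List (List Char)) (sN eN : Nat) (h1 : sN < eN) (h2 : eN ≤ lines.length) :
    lines.take (sN+1) ++ pvFinalize cid nl? ((lines.drop (sN+1)).take (eN-(sN+1))) ++ lines.drop eN =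
      (match pvB_findFwd (pvIsClient cid) lines (sN+1) eN with
       | some hit =>
         lines.take hit ++ nl?.toList ++ lines.drop (hit+1)
       | none =>
         match nl? with
         | some nl => lines.take (sN+1) ++ nl :: lines.drop (sN+1)
         | none => lines) := by
  rw [pv_findFwd_seg _ _ _ _ h2, pv_finalize_eq]
  set seg := (lines.drop (sN+1)).take (eN-(sN+1)) with hseg
  have hseglen : seg.length = eN - (sN+1) := by
    rw [hseg]
    simp
    omega
  cases hfi : seg.findIdx? (pvIsClient cid) with
  | some h =>
    obtain ⟨hhlt, _, _⟩ := List.findIdx?_eq_some_iff_getElem.mp hfi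
    simp only [Option.map_some]
    have hh : h < eN - (sN+1) := by omega
    -- take part
    have htake : lines.take (sN+1) ++ seg.take h = lines.take (sN+1+h) := by
      rw [hseg, List.take_take, min_eq_left (by omega), ← List.take_add]
    -- drop part
    have hdrop : seg.drop (h+1) ++ lines.drop eN = lines.drop (sN+1+h+1) := by
      rw [hseg, List.drop_take, List.drop_drop,
        show sN + 1 + (h + 1) = sN+1+h+1 from by omega,
        show eN - (sN+1) - (h+1) = eN - (sN+1+h+1) from by omega,
        show lines.drop eN = (lines.drop (sN+1+h+1)).drop (eN - (sN+1+h+1)) from by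
          rw [List.drop_drop]; congr 1; omega,
        List.take_append_drop]
    calc lines.take (sN+1) ++ (seg.take h ++ nl?.toList ++ seg.drop (h+1)) ++ lines.drop eN
        = (lines.take (sN+1) ++ seg.take h) ++ nl?.toList ++ (seg.drop (h+1) ++ lines.drop eN) := by
          simp [List.append_assoc]
      _ = lines.take (sN+1+h) ++ nl?.toList ++ lines.drop (sN+1+h+1) := by rw [htake, hdrop]
  | none =>
    simp only [Option.map_none]
    have hsegfull : seg ++ lines.drop eN = lines.drop (sN+1) := by
      rw [hseg]
      rw [show lines.drop eN = (lines.drop (sN+1)).drop (eN - (sN+1)) from by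
          rw [List.drop_drop]; congr 1; omega,
        List.take_append_drop]
    cases nl? with
    | some nl =>
      simp only
      rw [List.append_assoc, List.cons_append, hsegfull]
    | none =>
      simp only
      rw [List.append_assoc, hsegfull, List.take_append_drop]

-- B equals the staged model
theorem pv_B_model (config_text section_name client_id : String) (value : Option String) :
    update_line_in_section_py_alt config_text section_name client_id value =
      pvModel config_text section_name client_id value := by
  simp only [update_line_in_section_py_alt, pvModel]
  set lines := PySem.Chars.splitOn config_text.toList ['\n'] with hlines
  set hdr := pvHdr section_name with hhdr
  set cid := client_id.toList with hcid
  generalize value.map (pvClientLine client_id) = nl?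
  have hpost : ∀ st, (match st with
      | (o, some b, _) => o ++ pvFinalize cid nl? b
      | (o, none, done) =>
        if done then o
        else match nl? with
          | some nl => o ++ [hdr, nl, []]
          | none => o) = pvPost cid hdr nl? st := by
    intro st
    obtain ⟨o, b, d⟩ := st
    cases b <;> rfl
  cases hfind : lines.findIdx? (pvH hdr) with
  | none =>
    rw [pv_fold_pre hdr cid nl? lines [] (List.findIdx?_eq_none_iff.mp hfind)]
    cases nl? <;> simp
  | some f =>
    obtain ⟨hflt, hpf, hprev⟩ := List.findIdx?_eq_some_iff_getElem.mp hfind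
    -- split lines at the first header
    have hsp : lines = lines.take f ++ lines[f] :: lines.drop (f+1) := by
      conv_lhs => rw [← List.take_append_drop f lines]
      rw [List.drop_eq_getElem_cons hflt]
    have hnopre : ∀ l ∈ lines.take f, pvH hdr l = false := by
      intro l hl
      obtain ⟨i, hi, rfl⟩ := List.mem_take_iff_getElem.mp hl
      simpa using hprev i (by omega)
    -- run the fold to the state right after the first header
    have hfold : lines.foldl (pvStep hdr cid nl?) ([], none, false) =
        (lines.drop (f+1)).foldl (pvStep hdr cid nl?) (lines.take (f+1), some [], false) := by
      conv_lhs => rw [hsp]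
      rw [List.foldl_append, pv_fold_pre hdr cid nl? _ _ hnopre]
      simp only [List.foldl_cons, pvStep, hpf, Bool.not_false, Bool.true_and, if_true,
        Option.getD_none]
      congr 1
      rw [List.take_succ_eq_append_getElem hflt]
      simp
    rw [hfold, hpost, pv_fold_sec]
    -- identify K with the model's e
    have hstopfun : (fun l => PySem.Chars.startswith (PySem.Chars.strip l) ['['] && !pvH hdr l) = pvStop hdr := rfl
    rw [hstopfun]
    set rest := lines.drop (f+1) with hrest
    have hrestlen : rest.length = lines.length - (f+1) := by rw [hrest]; simp
    simp only [pvSecRes]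
    cases hk : rest.findIdx? (pvStop hdr) with
    | none =>
      have hBe : (pvB_findFwd (pvStop hdr) lines (f+1) lines.length).getD lines.length = lines.length := by
        rw [pv_findFwd_eq (pvStop hdr) lines (f+1) (by omega), ← hrest, hk]
        rfl
      rw [hBe]
      simp only [hk, Option.getD_none, List.take_length, List.drop_length]
      rw [pv_s_eq hdr lines f lines.length hflt hpf (by omega) (le_refl _), ← hrest,
        show rest.take (lines.length - (f+1)) = rest from by rw [← hrestlen, List.take_length]]
      cases hlp : pvLastP (pvH hdr) rest with
      | none =>
        simp only [Option.elim_none, List.nil_append, List.append_nil]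
        have hbr := pv_seg_branch cid nl? lines f lines.length (by omega) (le_refl _)
        rw [List.drop_length, List.append_nil, ← hrest,
          show rest.take (lines.length - (f+1)) = rest from by rw [← hrestlen, List.take_length]] at hbr
        rw [hbr]
        cases hhit : pvB_findFwd (pvIsClient cid) lines (f+1) lines.length with
        | some hit => cases nl? <;> simp [hrest]
        | none => cases nl? <;> simp [hrest]
      | some j =>
        simp only [Option.elim_some]
        have hjlt : j < rest.length := pv_lastP_lt _ _ _ hlp
        have htk : lines.take (f+1) ++ rest.take (j+1) = lines.take (f+1+j+1) := by
          rw [hrest, ← List.take_add]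
          congr 1 <;> omega
        have hsegJ : rest.drop (j+1) = (lines.drop (f+1+j+1)).take (lines.length - (f+1+j+1)) := by
          rw [hrest, List.drop_drop,
            show f + 1 + (j + 1) = f+1+j+1 from by omega,
            List.take_of_length_le (by simp)]
        simp only [List.append_nil, List.nil_append]
        rw [htk, hsegJ]
        have hbr := pv_seg_branch cid nl? lines (f+1+j) lines.length (by omega) (le_refl _)
        rw [List.drop_length, List.append_nil] at hbr
        rw [hbr]
        cases hhit : pvB_findFwd (pvIsClient cid) lines (f+1+j+1) lines.length with
        | some hit => cases nl? <;> simp [hrest]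
        | none => cases nl? <;> simp [hrest]
    | some k =>
      obtain ⟨hklt, _, _⟩ := List.findIdx?_eq_some_iff_getElem.mp hk
      have heN : f+1+k ≤ lines.length := by omega
      have hBe : (pvB_findFwd (pvStop hdr) lines (f+1) lines.length).getD lines.length = f+1+k := by
        rw [pv_findFwd_eq (pvStop hdr) lines (f+1) (by omega), ← hrest, hk]
        rfl
      rw [hBe]
      simp only [hk, Option.getD_some]
      rw [pv_s_eq hdr lines f (f+1+k) hflt hpf (by omega) heN,
        show f+1+k-(f+1) = k from by omega, ← hrest]
      have hdropk : rest.drop k = lines.drop (f+1+k) := by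
        rw [hrest, List.drop_drop]
      cases hlp : pvLastP (pvH hdr) (rest.take k) with
      | none =>
        simp only [Option.elim_none, List.nil_append]
        rw [hdropk]
        have hbr := pv_seg_branch cid nl? lines f (f+1+k) (by omega) heN
        rw [show f+1+k-(f+1) = k from by omega, ← hrest] at hbr
        rw [hbr]
        cases hhit : pvB_findFwd (pvIsClient cid) lines (f+1) (f+1+k) with
        | some hit => cases nl? <;> simp [hrest]
        | none => cases nl? <;> simp [hrest]
      | some j =>
        simp only [Option.elim_some]
        have hjlt : j < (rest.take k).length := pv_lastP_lt _ _ _ hlp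
        have hjk : j < k := by
          have : (rest.take k).length ≤ k := List.length_take_le _ _
          omega
        have htk2 : lines.take (f+1) ++ (rest.take k).take (j+1) = lines.take (f+1+j+1) := by
          rw [hrest, List.take_take, min_eq_left (by omega), ← List.take_add]
          congr 1 <;> omega
        have hsegJ2 : (rest.take k).drop (j+1) = (lines.drop (f+1+j+1)).take (f+1+k-(f+1+j+1)) := by
          rw [hrest, List.drop_take, List.drop_drop,
            show f + 1 + (j + 1) = f+1+j+1 from by omega,
            show k - (j+1) = f+1+k-(f+1+j+1) from by omega]
        simp only [List.append_nil, List.nil_append]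
        rw [htk2, hsegJ2, hdropk]
        have hbr := pv_seg_branch cid nl? lines (f+1+j) (f+1+k) (by omega) heN
        rw [hbr]
        cases hhit : pvB_findFwd (pvIsClient cid) lines (f+1+j+1) (f+1+k) with
        | some hit => cases nl? <;> simp [hrest]
        | none => cases nl? <;> simp [hrest]

-- ===== VERDICT (by name: the statement is the Claim_ definition above) =====
theorem update_line_in_section_py_spec : Claim_equal_update_line_in_section_py := by
  intro config_text section_name client_id value _
  exact (pv_A_model config_text section_name client_id value).trans
    (pv_B_model config_text section_name client_id value).symm
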